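-- pv_equiv track=rewrite | github.com/oliverjmfeix-sketch/ValenceV3 | app/scripts/validate_ontology.py | _infer_covenant_from_category_id
-- ===== SOURCE A (Python) =====
-- from typing import Dict, List, Optional, Set, Tuple
--
-- def _infer_covenant_from_category_id(cid: str) -> Optional[str]:
--     """Best-effort inference of covenant code from a category_id prefix."""
--     # Longest prefix match wins
--     candidates = [
--         ("LIENS", "LIENS"), ("MFN", "MFN"), ("FUND", "FUND"), ("AMD", "AMD"),
--         ("AFF", "AFF"), ("INV", "INV"), ("EOD", "EOD"), ("DI", "DI"),
--         ("PP", "PP"), ("PF", "PF"), ("FC", "FC"), ("CP", "CP"), ("AS", "AS"),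
--     ]
--     for prefix, cov in sorted(candidates, key=lambda x: -len(x[0])):
--         if cid.startswith(prefix):
--             return cov
--     if cid in {str(i) for i in range(1, 21)} or (len(cid) == 1 and cid.isalpha()):
--         # Historical RP single-letter / numeric-only categories
--         return "RP"
--     return None
-- ===== SOURCE B (Python) =====
-- _BY_LEN = {
--     5: frozenset({"LIENS"}),
--     4: frozenset({"FUND"}),
--     3: frozenset({"MFN", "AMD", "AFF", "INV", "EOD"}),
--     2: frozenset({"DI", "PP", "PF", "FC", "CP", "AS"}),
-- }
-- _RP_NUMERIC = frozenset(str(i) for i in range(1, 21))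
--
--
-- def _infer_covenant_from_category_id(cid):
--     """Best-effort inference of covenant code from a category_id prefix."""
--     # Longest prefix wins: try the distinct prefix lengths largest-first and
--     # test the length-L head of cid against the set of prefixes of that length.
--     for length in (5, 4, 3, 2):
--         head = cid[:length]
--         if head in _BY_LEN[length]:
--             return head
--     if cid in _RP_NUMERIC or (len(cid) == 1 and cid.isalpha()):
--         return "RP"
--     return None
-- ===== Notes on version B (the rewrite author's own statement) =====
-- stated objective: simpler
-- what changed: Replaces the sort-by-negative-length of 13 candidate pairs and a startswith scan with a precomputed length-indexed prefix table probed by slicing cid at each distinct length, largest first; the RP fallback set is precomputed at module level.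
import Mathlib
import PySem

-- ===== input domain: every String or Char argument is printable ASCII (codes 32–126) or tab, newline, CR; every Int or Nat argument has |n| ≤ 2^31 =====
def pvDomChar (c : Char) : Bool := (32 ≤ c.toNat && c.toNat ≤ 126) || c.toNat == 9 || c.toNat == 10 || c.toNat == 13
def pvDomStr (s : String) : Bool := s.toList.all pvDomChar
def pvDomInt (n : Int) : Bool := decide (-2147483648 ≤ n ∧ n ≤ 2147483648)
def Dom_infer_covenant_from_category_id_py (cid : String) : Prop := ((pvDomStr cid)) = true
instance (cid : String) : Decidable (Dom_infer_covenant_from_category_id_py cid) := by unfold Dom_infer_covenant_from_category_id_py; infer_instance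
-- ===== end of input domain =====

-- B replaces A's "sort candidates by -len, then startswith-scan" with a length-indexed
-- prefix table probed by slicing, largest length first (objective: simpler; same cost).

-- ===== PORT A =====
def pvA_candidates : List (String × String) :=
  [("LIENS", "LIENS"), ("MFN", "MFN"), ("FUND", "FUND"), ("AMD", "AMD"),
   ("AFF", "AFF"), ("INV", "INV"), ("EOD", "EOD"), ("DI", "DI"),
   ("PP", "PP"), ("PF", "PF"), ("FC", "FC"), ("CP", "CP"), ("AS", "AS")]

-- the for-loop with early return
def pvA_loop (cid : String) : List (String × String) → Option String
  | [] => none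
  | (pfx, cov) :: rest =>
      if PySem.Str.startswith cid pfx then some cov else pvA_loop cid rest

def infer_covenant_from_category_id_py (cid : String) : Option String :=
  match pvA_loop cid (PySem.List.sorted pvA_candidates (fun x => -(PySem.Str.len x.1)) false) with
  | some cov => some cov
  | none =>
      if PySem.Set.contains (PySem.Set.ofList ((PySem.List.pyRange 1 21 1).map PySem.Int.toStr)) cid
          || (PySem.Str.len cid == 1 && PySem.Str.strIsalpha cid) then
        some "RP"
      else
        none

-- ===== PORT B =====
-- the module-level length-indexed table _BY_LEN (dict lookup as a table function)
def pvB_byLen (L : Int) : PySem.Set String :=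
  if L == 5 then ["LIENS"]
  else if L == 4 then ["FUND"]
  else if L == 3 then ["MFN", "AMD", "AFF", "INV", "EOD"]
  else if L == 2 then ["DI", "PP", "PF", "FC", "CP", "AS"]
  else []

-- the module-level frozenset _RP_NUMERIC
def pvB_rpNumeric : PySem.Set String :=
  PySem.Set.ofList ((PySem.List.pyRange 1 21 1).map PySem.Int.toStr)

def pvB_loop (cid : String) : List Int → Option String
  | [] =>
      if PySem.Set.contains pvB_rpNumeric cid
          || (PySem.Str.len cid == 1 && PySem.Str.strIsalpha cid) then
        some "RP"
      else
        none
  | L :: rest =>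
      let head := PySem.Str.slice cid none (some L)
      if PySem.Set.contains (pvB_byLen L) head then some head else pvB_loop cid rest

def infer_covenant_from_category_id_py_alt (cid : String) : Option String :=
  pvB_loop cid [5, 4, 3, 2]

-- ===== PRECONDITION & SPEC =====
def Spec_infer_covenant_from_category_id_py (cid : String) (out : Option String) : Prop := out = infer_covenant_from_category_id_py_alt cid
instance (cid : String) (out : Option String) : Decidable (Spec_infer_covenant_from_category_id_py cid out) := by unfold Spec_infer_covenant_from_category_id_py; infer_instance

-- ===== CLAIM (what is proved, stated in full; the proofs are below) =====
def Claim_equal_infer_covenant_from_category_id_py : Prop := ∀ (cid : String), Dom_infer_covenant_from_category_id_py cid → Spec_infer_covenant_from_category_id_py cid (infer_covenant_from_category_id_py cid)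

-- ===== LEMMAS AND PROOFS =====

-- the sorted candidate list, evaluated
theorem pvA_sorted_eval :
    PySem.List.sorted pvA_candidates (fun x => -(PySem.Str.len x.1)) false =
      [("LIENS", "LIENS"), ("FUND", "FUND"), ("MFN", "MFN"), ("AMD", "AMD"),
       ("AFF", "AFF"), ("INV", "INV"), ("EOD", "EOD"), ("DI", "DI"),
       ("PP", "PP"), ("PF", "PF"), ("FC", "FC"), ("CP", "CP"), ("AS", "AS")] := by
  decide

-- startswith by a fixed prefix p equals comparing the length-|p| head slice with p
theorem pv_startswith_slice (cid p : String) (L : Int) (h : L = (p.toList.length : Int)) :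
    PySem.Str.startswith cid p = decide (PySem.Str.slice cid none (some L) = p) := by
  subst h
  rw [Bool.eq_iff_iff]
  simp only [decide_eq_true_eq]
  rw [← String.toList_inj]
  have hsl : (PySem.Str.slice cid none (some ((p.toList.length : Nat) : Int))).toList
      = cid.toList.take p.toList.length := by
    simp [PySem.Str.slice, PySem.List.slice_to_natCast]
  rw [hsl]
  rw [show PySem.Str.startswith cid p = PySem.Chars.startswith cid.toList p.toList from by simp]
  rw [PySem.Chars.startswith_iff]
  constructor
  · intro hp; exact (List.prefix_iff_eq_take.mp hp).symm
  · intro hp; exact List.prefix_iff_eq_take.mpr hp.symm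

theorem pv_contains_eval (l : List String) (x : String) :
    PySem.Set.contains l x = decide (x ∈ l) := by
  rw [Bool.eq_iff_iff]
  simp [PySem.Set.contains]


theorem infer_eq (cid : String) :
    infer_covenant_from_category_id_py cid = infer_covenant_from_category_id_py_alt cid := by
  unfold infer_covenant_from_category_id_py infer_covenant_from_category_id_py_alt
  rw [pvA_sorted_eval]
  simp only [pvA_loop, pvB_loop]
  rw [pv_startswith_slice cid "LIENS" 5 (by decide),
      pv_startswith_slice cid "FUND" 4 (by decide),
      pv_startswith_slice cid "MFN" 3 (by decide),
      pv_startswith_slice cid "AMD" 3 (by decide),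
      pv_startswith_slice cid "AFF" 3 (by decide),
      pv_startswith_slice cid "INV" 3 (by decide),
      pv_startswith_slice cid "EOD" 3 (by decide),
      pv_startswith_slice cid "DI" 2 (by decide),
      pv_startswith_slice cid "PP" 2 (by decide),
      pv_startswith_slice cid "PF" 2 (by decide),
      pv_startswith_slice cid "FC" 2 (by decide),
      pv_startswith_slice cid "CP" 2 (by decide),
      pv_startswith_slice cid "AS" 2 (by decide)]
  rw [show pvB_byLen 5 = ["LIENS"] from rfl, show pvB_byLen 4 = ["FUND"] from rfl,
      show pvB_byLen 3 = ["MFN", "AMD", "AFF", "INV", "EOD"] from rfl,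
      show pvB_byLen 2 = ["DI", "PP", "PF", "FC", "CP", "AS"] from rfl]
  simp only [pvB_rpNumeric, pv_contains_eval]
  generalize decide (cid ∈ PySem.Set.ofList ((PySem.List.pyRange 1 21 1).map PySem.Int.toStr)) = q
  generalize (PySem.Str.len cid == 1 && PySem.Str.strIsalpha cid) = r
  by_cases c1 : PySem.Str.slice cid none (some 5) = "LIENS"
  · simp [c1]
  by_cases c2 : PySem.Str.slice cid none (some 4) = "FUND"
  · simp [c1, c2]
  by_cases c3 : PySem.Str.slice cid none (some 3) = "MFN"
  · simp [c1, c2, c3]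
  by_cases c4 : PySem.Str.slice cid none (some 3) = "AMD"
  · simp [c1, c2, c4]
  by_cases c5 : PySem.Str.slice cid none (some 3) = "AFF"
  · simp [c1, c2, c5]
  by_cases c6 : PySem.Str.slice cid none (some 3) = "INV"
  · simp [c1, c2, c6]
  by_cases c7 : PySem.Str.slice cid none (some 3) = "EOD"
  · simp [c1, c2, c7]
  by_cases c8 : PySem.Str.slice cid none (some 2) = "DI"
  · simp [c1, c2, c3, c4, c5, c6, c7, c8]
  by_cases c9 : PySem.Str.slice cid none (some 2) = "PP"
  · simp [c1, c2, c3, c4, c5, c6, c7, c9]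
  by_cases c10 : PySem.Str.slice cid none (some 2) = "PF"
  · simp [c1, c2, c3, c4, c5, c6, c7, c10]
  by_cases c11 : PySem.Str.slice cid none (some 2) = "FC"
  · simp [c1, c2, c3, c4, c5, c6, c7, c11]
  by_cases c12 : PySem.Str.slice cid none (some 2) = "CP"
  · simp [c1, c2, c3, c4, c5, c6, c7, c12]
  by_cases c13 : PySem.Str.slice cid none (some 2) = "AS"
  · simp [c1, c2, c3, c4, c5, c6, c7, c13]
  simp [c1, c2, c3, c4, c5, c6, c7, c8, c9, c10, c11, c12, c13]

-- ===== VERDICT (by name: the statement is the Claim_ definition above) =====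
theorem infer_covenant_from_category_id_py_spec : Claim_equal_infer_covenant_from_category_id_py := by
  intro cid _
  unfold Spec_infer_covenant_from_category_id_py
  exact infer_eq cid
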